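-- pv_equiv track=rewrite | github.com/AndeLabs/zkusd-protocol | scripts/archive/generate-wallet-signet.py | convertbits
-- ===== SOURCE A (Python) =====
-- def convertbits(data, frombits, tobits, pad=True):
--     acc = 0
--     bits = 0
--     ret = []
--     maxv = (1 << tobits) - 1
--     for value in data:
--         acc = (acc << frombits) | value
--         bits += frombits
--         while bits >= tobits:
--             bits -= tobits
--             ret.append((acc >> bits) & maxv)
--     if pad:
--         if bits:
--             ret.append((acc << (tobits - bits)) & maxv)
--     return ret
-- ===== SOURCE B (Python) =====
-- def convertbits(data, frombits, tobits, pad=True):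
--     """Regroup a bit stream: record running prefixes, then slice groups by index."""
--     prefixes = [0]
--     acc = 0
--     for value in data:
--         acc = (acc << frombits) | value
--         prefixes.append(acc)
--     total = len(data) * frombits
--     maxv = (1 << tobits) - 1
--     out = []
--     for j in range(total // tobits):
--         k = -((-(j + 1) * tobits) // frombits)
--         out.append((prefixes[k] >> (k * frombits - (j + 1) * tobits)) & maxv)
--     if pad and total % tobits:
--         out.append((acc << (tobits - total % tobits)) & maxv)
--     return out
-- ===== Notes on version B (the rewrite author's own statement) =====
-- stated objective: alternative
-- what changed: Replaces the streaming accumulator with its inner while-loop and bits counter by a staged pass: record all running prefixes, compute the number of output groups in closed form (total // tobits), and slice each group by index from the right prefix via ceiling division; Pre_ excludes inputs where A raises (negative shift / negative tobits) or diverges (tobits == 0 with nonempty data), plus the single corner data == [] with tobits == 0 where A returns [] but B's closed-form group count divides by zero.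
-- outside the precondition, e.g. on convertbits([], 5, 0, True): A returns [], B raises ZeroDivisionError
import Mathlib
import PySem

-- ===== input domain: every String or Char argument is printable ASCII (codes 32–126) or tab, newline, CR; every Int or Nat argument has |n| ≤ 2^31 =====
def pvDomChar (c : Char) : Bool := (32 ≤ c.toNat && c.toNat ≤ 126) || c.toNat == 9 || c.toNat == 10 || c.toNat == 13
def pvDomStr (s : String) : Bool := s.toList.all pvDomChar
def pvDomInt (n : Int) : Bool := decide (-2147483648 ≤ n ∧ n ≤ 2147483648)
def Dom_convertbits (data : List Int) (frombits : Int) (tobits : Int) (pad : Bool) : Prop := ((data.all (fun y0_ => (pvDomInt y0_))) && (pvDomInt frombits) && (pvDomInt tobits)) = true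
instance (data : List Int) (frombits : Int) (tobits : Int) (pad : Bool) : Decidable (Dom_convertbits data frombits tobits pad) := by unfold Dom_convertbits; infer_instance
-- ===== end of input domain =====

-- B replaces A's streaming accumulator (inner while loop + bits counter) by a staged pass:
-- record all running prefixes, count the output groups in closed form, and slice each group
-- by index from the right prefix via ceiling division.  Objective: alternative (same cost).

-- ===== PORT A =====
-- inner 'while bits >= tobits' loop of A; fuel bounds the iterations (enough fuel is supplied
-- at the call site whenever tobits > 0, i.e. on all of Pre_; Python diverges for tobits ≤ 0).
def pvAWhile : Nat → Int → Int → Int → Int → List Int → Int × List Int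
  | 0, _, _, _, bits, ret => (bits, ret)
  | fuel+1, tobits, maxv, acc, bits, ret =>
    if tobits ≤ bits then
      pvAWhile fuel tobits maxv acc (bits - tobits)
        (ret ++ [PySem.Int.band (acc >>> (bits - tobits).toNat) maxv])
    else (bits, ret)

def convertbits (data : List Int) (frombits : Int) (tobits : Int) (pad : Bool) : List Int :=
  -- shifts use .toNat: on Pre_ every shift amount is nonnegative (Python raises otherwise)
  let maxv : Int := ((1:Int) <<< tobits.toNat) - 1
  let s := data.foldl (fun (s : Int × Int × List Int) value =>
      let acc := PySem.Int.bor (s.1 <<< frombits.toNat) value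
      let bits := s.2.1 + frombits
      let w := pvAWhile (bits.toNat + 1) tobits maxv acc bits s.2.2
      (acc, w.1, w.2)) (0, 0, [])
  if pad then
    (if s.2.1 ≠ 0 then s.2.2 ++ [PySem.Int.band (s.1 <<< (tobits - s.2.1).toNat) maxv] else s.2.2)
  else s.2.2

-- ===== PORT B =====
def convertbits_alt (data : List Int) (frombits : Int) (tobits : Int) (pad : Bool) : List Int :=
  let p := data.foldl (fun (s : List Int × Int) value =>
      let acc := PySem.Int.bor (s.2 <<< frombits.toNat) value
      (s.1 ++ [acc], acc)) ([(0:Int)], (0:Int))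
  let total : Int := (data.length : Int) * frombits
  let maxv : Int := ((1:Int) <<< tobits.toNat) - 1
  let out := (List.range (PySem.Int.floordiv total tobits).toNat).map (fun (jn : Nat) =>
      let j : Int := (jn : Int)
      let k : Int := -(PySem.Int.floordiv (-(j + 1) * tobits) frombits)
      PySem.Int.band (((PySem.List.pyGet? p.1 k).getD 0) >>> (k * frombits - (j + 1) * tobits).toNat) maxv)
  if pad ∧ PySem.Int.mod total tobits ≠ 0 then
    out ++ [PySem.Int.band (p.2 <<< (tobits - PySem.Int.mod total tobits).toNat) maxv]
  else out

-- ===== PRECONDITION & SPEC =====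
-- Pre_ excludes exactly: tobits < 0 (A raises ValueError at 1 << tobits), tobits = 0 with
-- nonempty data (A's inner while loop diverges), frombits < 0 with nonempty data (A raises
-- ValueError at acc << frombits), and the single corner data = [] with tobits = 0, where A
-- returns [] but B's closed-form group count total // tobits raises ZeroDivisionError.
def Pre_convertbits (data : List Int) (frombits : Int) (tobits : Int) (pad : Bool) : Prop :=
  0 < tobits ∧ (data = [] ∨ 0 ≤ frombits)
instance (data : List Int) (frombits : Int) (tobits : Int) (pad : Bool) : Decidable (Pre_convertbits data frombits tobits pad) := by unfold Pre_convertbits; infer_instance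

def pvWitness_convertbits : List Int × Int × Int × Bool := ([3, 1], 5, 8, true)

def Spec_convertbits (data : List Int) (frombits : Int) (tobits : Int) (pad : Bool) (out : List Int) : Prop := out = convertbits_alt data frombits tobits pad
instance (data : List Int) (frombits : Int) (tobits : Int) (pad : Bool) (out : List Int) : Decidable (Spec_convertbits data frombits tobits pad out) := by unfold Spec_convertbits; infer_instance

-- ===== CLAIM (what is proved, stated in full; the proofs are below) =====
def Claim_equal_convertbits : Prop := ∀ (data : List Int) (frombits : Int) (tobits : Int) (pad : Bool), Dom_convertbits data frombits tobits pad → Pre_convertbits data frombits tobits pad → Spec_convertbits data frombits tobits pad (convertbits data frombits tobits pad)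

-- ===== LEMMAS AND PROOFS =====

def pvPref (f : Int) (data : List Int) : Int :=
  data.foldl (fun a v => PySem.Int.bor (a <<< f.toNat) v) 0
def pvPrefList (f : Int) (data : List Int) : List Int :=
  (List.range (data.length + 1)).map (fun k => pvPref f (data.take k))
def pvGrp (t maxv acc b : Int) (i : Nat) : Int :=
  PySem.Int.band (acc >>> (b - ((i : Int) + 1) * t).toNat) maxv
def pvGFull (f t maxv : Int) (data : List Int) (jn : Nat) : Int :=
  PySem.Int.band (((PySem.List.pyGet? (pvPrefList f data)
      (-(PySem.Int.floordiv (-((jn : Int) + 1) * t) f))).getD 0)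
    >>> ((-(PySem.Int.floordiv (-((jn : Int) + 1) * t) f)) * f - ((jn : Int) + 1) * t).toNat) maxv
theorem pvPref_append (f : Int) (xs : List Int) (v : Int) :
    pvPref f (xs ++ [v]) = PySem.Int.bor (pvPref f xs <<< f.toNat) v := by
  simp [pvPref]
theorem pvPrefList_append (f : Int) (xs : List Int) (v : Int) :
    pvPrefList f (xs ++ [v]) = pvPrefList f xs ++ [pvPref f (xs ++ [v])] := by
  unfold pvPrefList
  rw [List.length_append, List.length_cons, List.length_nil]
  rw [show xs.length + (0+1) + 1 = (xs.length + 1) + 1 by omega, List.range_succ, List.map_append]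
  congr 1
  · apply List.map_congr_left
    intro k hk
    rw [List.mem_range] at hk
    rw [List.take_append_of_le_length (by omega)]
  · simp [List.take_of_length_le (by simp : (xs ++ [v]).length ≤ xs.length + 1)]
theorem pvLenPrefList (f : Int) (xs : List Int) : (pvPrefList f xs).length = xs.length + 1 := by
  simp [pvPrefList]
theorem pvGrp_succ (t maxv acc b : Int) (i : Nat) :
    pvGrp t maxv acc b (i + 1) = pvGrp t maxv acc (b - t) i := by
  unfold pvGrp
  have h : b - ((↑(i+1) : Int) + 1) * t = b - t - ((i : Int) + 1) * t := by push_cast; ring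
  rw [h]

theorem pvAWhile_spec (t maxv acc : Int) (ht : 0 < t) :
    ∀ (m fuel : Nat) (b : Int) (ret : List Int), (m : Int) * t ≤ b → b < ((m : Int) + 1) * t →
      m ≤ fuel →
      pvAWhile fuel t maxv acc b ret
        = (b - (m : Int) * t, ret ++ (List.range m).map (pvGrp t maxv acc b)) := by
  intro m
  induction m with
  | zero =>
    intro fuel b ret h1 h2 h3
    have hb : ¬ t ≤ b := by push_cast at h2; omega
    cases fuel with
    | zero => simp [pvAWhile]
    | succ fu => simp [pvAWhile, hb]
  | succ m ih =>
    intro fuel b ret h1 h2 h3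
    have hmt : (0:Int) ≤ (m : Int) * t := by positivity
    have hexp : ((↑(m+1) : Int)) * t = (m : Int) * t + t := by push_cast; ring
    have hb : t ≤ b := by rw [hexp] at h1; omega
    cases fuel with
    | zero => omega
    | succ fu =>
      rw [show pvAWhile (fu+1) t maxv acc b ret
          = pvAWhile fu t maxv acc (b - t) (ret ++ [PySem.Int.band (acc >>> (b - t).toNat) maxv])
          from by simp [pvAWhile, hb]]
      have hexp2 : ((↑(m+1) : Int) + 1) * t = ((m : Int) + 1) * t + t := by push_cast; ring
      have hexp3 : ((m : Int) + 1) * t = (m : Int) * t + t := by ring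
      rw [ih fu (b - t) _ (by rw [hexp] at h1; omega) (by rw [hexp2, hexp3] at h2; omega) (by omega)]
      simp only [Prod.mk.injEq]
      constructor
      · rw [hexp]; ring
      · rw [List.append_assoc]
        congr 1
        rw [List.range_succ_eq_map, List.map_cons, List.map_map]
        have : pvGrp t maxv acc b 0 = PySem.Int.band (acc >>> (b - t).toNat) maxv := by
          unfold pvGrp; norm_num
        rw [this]
        simp only [List.singleton_append, List.cons.injEq, true_and]
        apply List.map_congr_left
        intro i _
        simp only [Function.comp_apply]
        exact (pvGrp_succ t maxv acc b i).symm |>.symm ▸ (pvGrp_succ t maxv acc b i)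

set_option maxHeartbeats 1000000 in
theorem pvFoldA (f t : Int) (hf : 0 ≤ f) (ht : 0 < t) (maxv : Int) (data : List Int) :
    data.foldl (fun (s : Int × Int × List Int) value =>
      let acc := PySem.Int.bor (s.1 <<< f.toNat) value
      let bits := s.2.1 + f
      let w := pvAWhile (bits.toNat + 1) t maxv acc bits s.2.2
      (acc, w.1, w.2)) (0, 0, [])
    = (pvPref f data, PySem.Int.mod ((data.length : Int) * f) t,
       (List.range (PySem.Int.floordiv ((data.length : Int) * f) t).toNat).map
         (pvGFull f t maxv data)) := by
  induction data using List.reverseRecOn with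
  | nil =>
    simp [pvPref, PySem.Int.mod, PySem.Int.floordiv]
  | append_singleton xs v ih =>
    rw [List.foldl_append, ih]
    simp only [List.foldl_cons, List.foldl_nil]
    set n := xs.length with hn
    set N : Int := (n : Int) * f with hN
    set c0 : Int := PySem.Int.floordiv N t with hc0
    set c1 : Int := PySem.Int.floordiv (N + f) t with hc1
    have hNlen : ((xs ++ [v]).length : Int) * f = N + f := by
      simp [hN]; ring
    have key3 : c0 * t + PySem.Int.mod N t = N := PySem.Int.floordiv_mul_add_mod N t
    have hm0 : 0 ≤ PySem.Int.mod N t := PySem.Int.mod_nonneg N ht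
    have hm1 : PySem.Int.mod N t < t := PySem.Int.mod_lt N ht
    have key1 : c1 * t + PySem.Int.mod (N + f) t = N + f := PySem.Int.floordiv_mul_add_mod (N + f) t
    have hm0' : 0 ≤ PySem.Int.mod (N + f) t := PySem.Int.mod_nonneg (N + f) ht
    have hm1' : PySem.Int.mod (N + f) t < t := PySem.Int.mod_lt (N + f) ht
    have hNnn : 0 ≤ N := by positivity
    have hc0nn : 0 ≤ c0 := by
      rw [hc0, PySem.Int.le_floordiv_iff_mul_le ht]; linarith
    have hc01 : c0 ≤ c1 := by
      rw [hc1, PySem.Int.le_floordiv_iff_mul_le ht]; linarith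
    set m : Nat := (c1 - c0).toNat with hm
    have hmInt : (m : Int) = c1 - c0 := by rw [hm]; omega
    set b : Int := PySem.Int.mod N t + f with hb
    have hbnn : 0 ≤ b := by rw [hb]; linarith
    have bound1 : (m : Int) * t ≤ b := by
      have : (m : Int) * t = c1 * t - c0 * t := by rw [hmInt]; ring
      rw [this, hb]; linarith
    have bound2 : b < ((m : Int) + 1) * t := by
      have : ((m : Int) + 1) * t = c1 * t - c0 * t + t := by rw [hmInt]; ring
      rw [this, hb]; linarith
    have hfuel : m ≤ b.toNat + 1 := by
      have h1 : (m : Int) ≤ (m : Int) * t := by nlinarith [Int.natCast_nonneg m]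
      have h2 : (m : Int) ≤ b := le_trans h1 bound1
      omega
    rw [pvAWhile_spec t maxv _ ht m (b.toNat + 1) b _ bound1 bound2 hfuel]
    simp only [Prod.mk.injEq]
    refine ⟨(pvPref_append f xs v).symm, ?_, ?_⟩
    · rw [hNlen]
      have e1 : (m : Int) * t = c1 * t - c0 * t := by rw [hmInt]; ring
      linarith [e1, key1, key3, hb]
    · rw [hNlen]
      have hcnat : c1.toNat = c0.toNat + m := by omega
      rw [hcnat, List.range_add, List.map_append]
      congr 1
      · -- old groups unchanged
        apply List.map_congr_left
        intro j hj
        rw [List.mem_range] at hj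
        have hjc : (j : Int) + 1 ≤ c0 := by omega
        have hc0pos : (1:Int) ≤ c0 := by omega
        have hfpos : 0 < f := by
          rcases lt_or_eq_of_le hf with h | h
          · exact h
          · exfalso
            have : N = 0 := by rw [hN, ← h]; ring
            nlinarith
        unfold pvGFull
        set k : Int := -(PySem.Int.floordiv (-((j:Int) + 1) * t) f) with hk
        have hkc : ((k - 1) * f < ((j:Int) + 1) * t ∧ ((j:Int) + 1) * t ≤ k * f) := by
          rw [hk]
          have := (PySem.Int.neg_floordiv_neg_eq_iff_of_pos (a := ((j:Int) + 1) * t)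
            (b := f) (q := -(PySem.Int.floordiv (-((j:Int) + 1) * t) f)) hfpos)
          rw [← neg_mul] at this
          exact this.mp rfl
        have hat : ((j:Int) + 1) * t ≤ c0 * t := by
          exact mul_le_mul_of_nonneg_right hjc (le_of_lt ht)
        have haN : ((j:Int) + 1) * t ≤ N := by linarith [key3, hm0]
        have hapos : 0 < ((j:Int) + 1) * t := by positivity
        have hk1 : 1 ≤ k := by nlinarith
        have hkn : k ≤ (n : Int) := by
          have h1 : (k - 1) * f < (n : Int) * f := by rw [← hN]; linarith [hkc.1]
          have := lt_of_mul_lt_mul_right h1 (le_of_lt hfpos)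
          omega
        rw [pvPrefList_append]
        rw [PySem.List.pyGet?_of_nonneg _ (by omega : (0:Int) ≤ k),
            PySem.List.pyGet?_of_nonneg _ (by omega : (0:Int) ≤ k)]
        rw [List.getElem?_append_left (by rw [pvLenPrefList]; omega)]
      · -- new groups come from the last prefix
        rw [List.map_map]
        symm
        apply List.map_congr_left
        intro i hi
        simp only [Function.comp_apply]
        rw [List.mem_range] at hi
        have him : (i : Int) < (m : Int) := by exact_mod_cast hi
        have hm1i : (1:Int) ≤ (m : Int) := by omega
        have hfpos : 0 < f := by
          have : t ≤ (m:Int) * t := by nlinarith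
          linarith [bound1, hm1, hb]
        unfold pvGFull
        have hjInt : ((c0.toNat + i : Nat) : Int) = c0 + (i : Int) := by push_cast; omega
        rw [hjInt]
        have hja : (c0 + (i:Int) + 1) * t ≤ N + f := by
          have hjc1 : c0 + (i:Int) + 1 ≤ c1 := by omega
          have := mul_le_mul_of_nonneg_right hjc1 (le_of_lt ht)
          linarith [key1, hm0']
        have hjb : N < (c0 + (i:Int) + 1) * t := by nlinarith [Int.natCast_nonneg i]
        have hkval : -(PySem.Int.floordiv (-(c0 + (i:Int) + 1) * t) f) = (n : Int) + 1 := by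
          have := (PySem.Int.neg_floordiv_neg_eq_iff_of_pos (a := (c0 + (i:Int) + 1) * t)
            (b := f) (q := (n:Int) + 1) hfpos)
          rw [← neg_mul] at this
          apply this.mpr
          constructor
          · simp only [add_sub_cancel_right]; rw [← hN]; exact hjb
          · have he : ((n:Int) + 1) * f = N + f := by rw [hN]; ring
            rw [he]; exact hja
        rw [hkval]
        rw [pvPrefList_append]
        have hgl : PySem.List.pyGet? (pvPrefList f xs ++ [pvPref f (xs ++ [v])]) ((n:Int) + 1)
            = some (pvPref f (xs ++ [v])) := by
          have hlen : ((pvPrefList f xs).length : Int) = (n : Int) + 1 := by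
            rw [pvLenPrefList]; push_cast; ring
          rw [← hlen]
          exact PySem.List.pyGet?_append_length _ [] _
        rw [hgl]
        unfold pvGrp
        have hsh : ((n:Int) + 1) * f - (c0 + (i:Int) + 1) * t = b - ((i:Int) + 1) * t := by
          rw [hb]; have : (n:Int) * f = N := hN.symm
          nlinarith [key3]
        rw [hsh, Option.getD_some, pvPref_append]

theorem pvFoldB (f : Int) (data : List Int) :
    data.foldl (fun (s : List Int × Int) value =>
      (s.1 ++ [PySem.Int.bor (s.2 <<< f.toNat) value], PySem.Int.bor (s.2 <<< f.toNat) value))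
      ([(0:Int)], (0:Int)) = (pvPrefList f data, pvPref f data) := by
  induction data using List.reverseRecOn with
  | nil => simp [pvPrefList, pvPref]
  | append_singleton xs v ih =>
    rw [List.foldl_append, ih, pvPrefList_append]
    simp [pvPref]

-- let-free restatements of the two ports (definitional: `rfl` zeta-reduces the lets)
theorem pvA_unfold (data : List Int) (f t : Int) (pad : Bool) :
    convertbits data f t pad =
      (if pad then
        (if (data.foldl (fun (s : Int × Int × List Int) value =>
              let acc := PySem.Int.bor (s.1 <<< f.toNat) value
              let bits := s.2.1 + f
              let w := pvAWhile (bits.toNat + 1) t (((1:Int) <<< t.toNat) - 1) acc bits s.2.2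
              (acc, w.1, w.2)) (0, 0, [])).2.1 ≠ 0 then
          (data.foldl (fun (s : Int × Int × List Int) value =>
              let acc := PySem.Int.bor (s.1 <<< f.toNat) value
              let bits := s.2.1 + f
              let w := pvAWhile (bits.toNat + 1) t (((1:Int) <<< t.toNat) - 1) acc bits s.2.2
              (acc, w.1, w.2)) (0, 0, [])).2.2 ++
            [PySem.Int.band ((data.foldl (fun (s : Int × Int × List Int) value =>
              let acc := PySem.Int.bor (s.1 <<< f.toNat) value
              let bits := s.2.1 + f
              let w := pvAWhile (bits.toNat + 1) t (((1:Int) <<< t.toNat) - 1) acc bits s.2.2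
              (acc, w.1, w.2)) (0, 0, [])).1 <<<
                (t - (data.foldl (fun (s : Int × Int × List Int) value =>
              let acc := PySem.Int.bor (s.1 <<< f.toNat) value
              let bits := s.2.1 + f
              let w := pvAWhile (bits.toNat + 1) t (((1:Int) <<< t.toNat) - 1) acc bits s.2.2
              (acc, w.1, w.2)) (0, 0, [])).2.1).toNat) (((1:Int) <<< t.toNat) - 1)]
        else (data.foldl (fun (s : Int × Int × List Int) value =>
              let acc := PySem.Int.bor (s.1 <<< f.toNat) value
              let bits := s.2.1 + f
              let w := pvAWhile (bits.toNat + 1) t (((1:Int) <<< t.toNat) - 1) acc bits s.2.2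
              (acc, w.1, w.2)) (0, 0, [])).2.2)
      else (data.foldl (fun (s : Int × Int × List Int) value =>
              let acc := PySem.Int.bor (s.1 <<< f.toNat) value
              let bits := s.2.1 + f
              let w := pvAWhile (bits.toNat + 1) t (((1:Int) <<< t.toNat) - 1) acc bits s.2.2
              (acc, w.1, w.2)) (0, 0, [])).2.2) := rfl

theorem pvB_unfold (data : List Int) (f t : Int) (pad : Bool) :
    convertbits_alt data f t pad =
      (if pad ∧ PySem.Int.mod ((data.length : Int) * f) t ≠ 0 then
        (List.range (PySem.Int.floordiv ((data.length : Int) * f) t).toNat).map (fun (jn : Nat) =>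
            let j : Int := (jn : Int)
            let k : Int := -(PySem.Int.floordiv (-(j + 1) * t) f)
            PySem.Int.band (((PySem.List.pyGet? (data.foldl (fun (s : List Int × Int) value =>
                let acc := PySem.Int.bor (s.2 <<< f.toNat) value
                (s.1 ++ [acc], acc)) ([(0:Int)], (0:Int))).1 k).getD 0) >>>
              (k * f - (j + 1) * t).toNat) (((1:Int) <<< t.toNat) - 1)) ++
          [PySem.Int.band ((data.foldl (fun (s : List Int × Int) value =>
                let acc := PySem.Int.bor (s.2 <<< f.toNat) value
                (s.1 ++ [acc], acc)) ([(0:Int)], (0:Int))).2 <<<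
              (t - PySem.Int.mod ((data.length : Int) * f) t).toNat) (((1:Int) <<< t.toNat) - 1)]
      else
        (List.range (PySem.Int.floordiv ((data.length : Int) * f) t).toNat).map (fun (jn : Nat) =>
            let j : Int := (jn : Int)
            let k : Int := -(PySem.Int.floordiv (-(j + 1) * t) f)
            PySem.Int.band (((PySem.List.pyGet? (data.foldl (fun (s : List Int × Int) value =>
                let acc := PySem.Int.bor (s.2 <<< f.toNat) value
                (s.1 ++ [acc], acc)) ([(0:Int)], (0:Int))).1 k).getD 0) >>>
              (k * f - (j + 1) * t).toNat) (((1:Int) <<< t.toNat) - 1))) := rfl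

-- ===== VERDICT (by name: the statement is the Claim_ definition above) =====
theorem convertbits_spec : Claim_equal_convertbits := by
  intro data f t pad hdom hpre
  obtain ⟨ht, hcase⟩ := hpre
  unfold Spec_convertbits
  rw [pvA_unfold, pvB_unfold]
  have hf : 0 ≤ f ∨ data = [] := by tauto
  rcases hcase with hnil | hf'
  · subst hnil
    simp [PySem.Int.mod, PySem.Int.floordiv]
  · rw [pvFoldB, pvFoldA f t hf' ht]
    have hfun : (fun (jn : Nat) =>
        let j : Int := (jn : Int)
        let k : Int := -(PySem.Int.floordiv (-(j + 1) * t) f)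
        PySem.Int.band (((PySem.List.pyGet? (pvPrefList f data, pvPref f data).1 k).getD 0) >>>
          (k * f - (j + 1) * t).toNat) (((1:Int) <<< t.toNat) - 1))
        = pvGFull f t (((1:Int) <<< t.toNat) - 1) data := rfl
    rw [hfun]
    cases pad <;> simp
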